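-- pv_equiv track=rewrite | github.com/jdeeburke/aoc2024 | python/2/partTwo.py | is_descending
-- ===== SOURCE A (Python) =====
-- def is_descending(numbers, used_exception=False):
--     for idx, (a, b) in enumerate(zip(numbers, numbers[1:])):
--         if b >= a or b < a - 3:
--             if used_exception: return False
--
--             list_a = numbers.copy()
--             del list_a[idx]
--
--             list_b = numbers.copy()
--             del list_b[idx+1]
--
--             return is_descending(list_a, True) or is_descending(list_b, True)
--
--     return True
-- ===== SOURCE B (Python) =====
-- def _strict(seq):
--     return all(a - 3 <= b < a for a, b in zip(seq, seq[1:]))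
--
--
-- def is_descending(numbers, used_exception=False):
--     if used_exception:
--         return _strict(numbers)
--     if _strict(numbers):
--         return True
--     return any(_strict(numbers[:i] + numbers[i + 1:]) for i in range(len(numbers)))
-- ===== Notes on version B (the rewrite author's own statement) =====
-- stated objective: simpler
-- what changed: Replaces A's targeted recursion at the first violating pair (deleting index idx or idx+1 and re-checking) with a plain strict-descent predicate plus a brute-force scan over all single-element removals.
import Mathlib
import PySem

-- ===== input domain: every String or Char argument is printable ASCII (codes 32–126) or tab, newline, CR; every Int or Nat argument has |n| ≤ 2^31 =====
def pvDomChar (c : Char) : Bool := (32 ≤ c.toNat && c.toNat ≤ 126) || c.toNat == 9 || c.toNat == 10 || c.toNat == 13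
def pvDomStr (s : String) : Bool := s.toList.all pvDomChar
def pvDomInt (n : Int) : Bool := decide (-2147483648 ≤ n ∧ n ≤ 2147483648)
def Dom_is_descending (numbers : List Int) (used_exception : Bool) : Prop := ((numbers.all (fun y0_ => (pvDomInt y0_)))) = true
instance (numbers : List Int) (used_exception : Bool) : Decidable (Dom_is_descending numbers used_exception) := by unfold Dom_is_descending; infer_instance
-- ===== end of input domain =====

-- B replaces A's targeted recursion at the first violating pair by a strict-descent check
-- plus a brute-force scan over all single-element removals (simpler; not faster).

-- ===== PORT A =====
-- A's loop 'for idx, (a, b) in enumerate(zip(numbers, numbers[1:]))' searching the first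
-- violating adjacent pair, returning its index (none = loop fell through).
def findViol : Nat → List Int → Option Nat
  | idx, a :: b :: t => if b ≥ a || b < a - 3 then some idx else findViol (idx + 1) (b :: t)
  | _, _ => none

-- needed for termination of is_descending: a found index is a valid pair index
theorem findViol_le_lt : ∀ (l : List Int) (j i : Nat), findViol j l = some i →
    j ≤ i ∧ i - j + 1 < l.length := by
  intro l
  induction l with
  | nil => intro j i h; simp [findViol] at h
  | cons a t ih =>
    intro j i h
    match t with
    | [] => simp [findViol] at h
    | b :: t' =>
      by_cases hv : b ≥ a || b < a - 3
      · simp [findViol, hv] at h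
        subst h
        refine ⟨Nat.le_refl _, ?_⟩
        simp only [List.length_cons]; omega
      · simp [findViol, hv] at h
        have := ih (j + 1) i h
        simp at this ⊢; omega

-- 'del list[k]' on a valid index k is List.eraseIdx k
def is_descending (numbers : List Int) (used_exception : Bool) : Bool :=
  match h : findViol 0 numbers with
  | none => true
  | some idx =>
    if used_exception then false
    else is_descending (numbers.eraseIdx idx) true || is_descending (numbers.eraseIdx (idx + 1)) true
termination_by numbers.length
decreasing_by
  · have := findViol_le_lt numbers 0 idx h
    rw [List.length_eraseIdx_of_lt (by omega)]; omega
  · have := findViol_le_lt numbers 0 idx h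
    rw [List.length_eraseIdx_of_lt (by omega)]; omega

-- ===== PORT B =====
-- _strict(seq) = all(a - 3 <= b < a for a, b in zip(seq, seq[1:]))
def strictB : List Int → Bool
  | a :: b :: t => (a - 3 ≤ b && b < a) && strictB (b :: t)
  | _ => true

-- slices numbers[:i] / numbers[i+1:] with 0 ≤ i < len are take i / drop (i+1)
def is_descending_alt (numbers : List Int) (used_exception : Bool) : Bool :=
  if used_exception then strictB numbers
  else if strictB numbers then true
  else (List.range numbers.length).any
    (fun i => strictB (numbers.take i ++ numbers.drop (i + 1)))

-- ===== PRECONDITION & SPEC =====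
def Spec_is_descending (numbers : List Int) (used_exception : Bool) (out : Bool) : Prop := out = is_descending_alt numbers used_exception
instance (numbers : List Int) (used_exception : Bool) (out : Bool) : Decidable (Spec_is_descending numbers used_exception out) := by unfold Spec_is_descending; infer_instance

-- ===== CLAIM (what is proved, stated in full; the proofs are below) =====
def Claim_equal_is_descending : Prop := ∀ (numbers : List Int) (used_exception : Bool), Dom_is_descending numbers used_exception → Spec_is_descending numbers used_exception (is_descending numbers used_exception)

-- ===== LEMMAS AND PROOFS =====

-- findViol finds nothing exactly when the list is strictly descending with gaps ≤ 3
theorem findViol_none_iff : ∀ (l : List Int) (j : Nat),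
    findViol j l = none ↔ strictB l = true := by
  intro l
  induction l with
  | nil => intro j; simp [findViol, strictB]
  | cons a t ih =>
    intro j
    match t with
    | [] => simp [findViol, strictB]
    | b :: t' =>
      by_cases hv : b ≥ a || b < a - 3
      · have he : findViol j (a :: b :: t') = some j := by simp [findViol, hv]
        rw [he]
        simp only [strictB, Bool.and_eq_true, decide_eq_true_eq]
        simp at hv ⊢
        intro h1 h2
        omega
      · have he : findViol j (a :: b :: t') = findViol (j + 1) (b :: t') := by
          simp [findViol, hv]
        rw [he, ih (j + 1)]
        simp only [strictB, Bool.and_eq_true, decide_eq_true_eq]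
        simp at hv
        exact ⟨fun hs => ⟨⟨by omega, by omega⟩, hs⟩, fun h => h.2⟩

-- getElem characterisation of strictB
theorem strictB_iff (l : List Int) : strictB l = true ↔
    ∀ k (hk : k + 1 < l.length),
      l[k + 1]'hk < l[k]'(Nat.lt_of_succ_lt hk) ∧ l[k]'(Nat.lt_of_succ_lt hk) - 3 ≤ l[k + 1]'hk := by
  induction l with
  | nil => simp [strictB]
  | cons a t ih =>
    match t with
    | [] =>
      simp [strictB]
    | b :: t' =>
      simp only [strictB, Bool.and_eq_true, decide_eq_true_eq, ih]
      constructor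
      · rintro ⟨⟨h1, h2⟩, h3⟩ k hk
        match k with
        | 0 =>
          constructor
          · simpa using h2
          · simp only [List.getElem_cons_zero, List.getElem_cons_succ]; omega
        | k' + 1 =>
          have hk' : k' + 1 < (b :: t').length := by simpa using hk
          simpa using h3 k' hk'
      · intro h
        refine ⟨⟨?_, ?_⟩, ?_⟩
        · have := h 0 (by simp); simpa using this.2
        · have := h 0 (by simp); simpa using this.1
        · intro k hk
          have := h (k + 1) (by simpa using hk)
          simpa using this

-- a found index really is a violating pair
theorem findViol_some_spec : ∀ (l : List Int) (j i : Nat), findViol j l = some i →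
    ∃ k, ∃ hk : k + 1 < l.length, i = j + k ∧
      (l[k]'(Nat.lt_of_succ_lt hk) ≤ l[k + 1]'hk ∨ l[k + 1]'hk < l[k]'(Nat.lt_of_succ_lt hk) - 3) := by
  intro l
  induction l with
  | nil => intro j i h; simp [findViol] at h
  | cons a t ih =>
    intro j i h
    match t with
    | [] => simp [findViol] at h
    | b :: t' =>
      by_cases hv : b ≥ a || b < a - 3
      · simp [findViol, hv] at h
        subst h
        refine ⟨0, by simp, by omega, ?_⟩
        simpa using by simpa using hv
      · simp [findViol, hv] at h
        obtain ⟨k, hk, hik, hpair⟩ := ih (j + 1) i h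
        refine ⟨k + 1, by simpa using hk, by omega, ?_⟩
        simpa using hpair

-- removing any element other than the two of the first violating pair leaves that pair adjacent
theorem no_other_removal (l : List Int) (i : Nat) (hi : i + 1 < l.length)
    (hv : l[i]'(Nat.lt_of_succ_lt hi) ≤ l[i + 1]'hi ∨ l[i + 1]'hi < l[i]'(Nat.lt_of_succ_lt hi) - 3)
    (j : Nat) (hj : j < l.length) (h1 : j ≠ i) (h2 : j ≠ i + 1) :
    strictB (l.eraseIdx j) = false := by
  by_contra hc
  rw [Bool.not_eq_false, strictB_iff] at hc
  have hlen : (l.eraseIdx j).length = l.length - 1 := List.length_eraseIdx_of_lt hj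
  rcases Nat.lt_or_ge j i with hji | hji
  · -- j < i: the pair sits at positions i-1, i of the erased list
    have hi1 : i - 1 + 1 < (l.eraseIdx j).length := by omega
    have := hc (i - 1) hi1
    have e1 : (l.eraseIdx j)[i - 1]'(Nat.lt_of_succ_lt hi1) = l[i]'(Nat.lt_of_succ_lt hi) := by
      rw [List.getElem_eraseIdx_of_ge (by omega) (by omega)]
      congr 1; omega
    have e2 : (l.eraseIdx j)[i - 1 + 1]'hi1 = l[i + 1]'hi := by
      rw [List.getElem_eraseIdx_of_ge (by omega) (by omega)]
      congr 1; omega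
    rw [e1, e2] at this
    omega
  · -- j > i + 1: the pair sits at positions i, i+1 of the erased list
    have hji' : i + 1 < j := by omega
    have hi1 : i + 1 < (l.eraseIdx j).length := by omega
    have := hc i hi1
    have e1 : (l.eraseIdx j)[i]'(Nat.lt_of_succ_lt hi1) = l[i]'(Nat.lt_of_succ_lt hi) :=
      List.getElem_eraseIdx_of_lt _ (by omega)
    have e2 : (l.eraseIdx j)[i + 1]'hi1 = l[i + 1]'hi :=
      List.getElem_eraseIdx_of_lt _ (by omega)
    rw [e1, e2] at this
    omega

-- A with used_exception=True is exactly the strict check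
theorem is_descending_true_eq (l : List Int) : is_descending l true = strictB l := by
  rw [is_descending]
  cases h : findViol 0 l with
  | none => exact ((findViol_none_iff l 0).mp h).symm
  | some idx =>
    simp only [if_pos]
    have : strictB l ≠ true := by
      intro hs
      rw [← findViol_none_iff l 0] at hs
      simp [hs] at h
    simp [this]

theorem is_descending_spec' (l : List Int) (ue : Bool) :
    is_descending l ue = is_descending_alt l ue := by
  cases ue with
  | true => rw [is_descending_true_eq]; rfl
  | false =>
    rw [is_descending]
    cases h : findViol 0 l with
    | none =>
      have hs := (findViol_none_iff l 0).mp h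
      simp [is_descending_alt, hs]
    | some i =>
      have hs : strictB l = false := by
        rw [Bool.eq_false_iff]
        intro hsl
        rw [← findViol_none_iff l 0] at hsl
        simp [hsl] at h
      obtain ⟨k, hk, hik, hpair⟩ := findViol_some_spec l 0 i h
      have hik' : i = k := by omega
      subst hik'
      simp only [Bool.false_eq_true, if_false, is_descending_true_eq, is_descending_alt, hs]
      simp only [← List.eraseIdx_eq_take_drop_succ]
      cases hA : (strictB (l.eraseIdx i) || strictB (l.eraseIdx (i + 1))) with
      | true =>
        rw [Bool.or_eq_true] at hA
        symm
        rw [List.any_eq_true]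
        rcases hA with hA | hA
        · exact ⟨i, by rw [List.mem_range]; omega, hA⟩
        · exact ⟨i + 1, by rw [List.mem_range]; omega, hA⟩
      | false =>
        rw [Bool.or_eq_false_iff] at hA
        symm
        rw [List.any_eq_false]
        intro j hj
        rw [List.mem_range] at hj
        by_cases e1 : j = i
        · subst e1; simp [hA.1]
        · by_cases e2 : j = i + 1
          · subst e2; simp [hA.2]
          · simp [no_other_removal l i hk hpair j hj e1 e2]

-- ===== VERDICT (by name: the statement is the Claim_ definition above) =====
theorem is_descending_spec : Claim_equal_is_descending := by
  intro numbers ue _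
  exact is_descending_spec' numbers ue
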